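-- pv_equiv track=rewrite | github.com/vigine-dev/Vigine | script/check_wrapper_encapsulation.py | _find_class_body_end
-- ===== SOURCE A (Python) =====
-- def _strip_line_comment(line: str) -> str:
--     """Remove trailing // comment; crude but sufficient for brace counting."""
--     pos = line.find("//")
--     return line[:pos] if pos >= 0 else line
--
-- def _find_class_body_end(lines: list[str], start: int) -> int | None:
--     """Return the 0-based index of the closing '}' line for the class at *start*.
--
--     Returns None when no opening brace is found (forward declaration).
--     """
--     depth = 0
--     found_open = False
--     for idx in range(start, len(lines)):
--         sc = _strip_line_comment(lines[idx])
--         opens  = sc.count("{")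
--         closes = sc.count("}")
--         if not found_open:
--             if opens > 0:
--                 found_open = True
--             elif ";" in sc:
--                 return None  # Forward declaration.
--         if found_open:
--             depth += opens - closes
--             if depth <= 0:
--                 return idx
--     return None
-- ===== SOURCE B (Python) =====
-- def _strip_line_comment(line: str) -> str:
--     """Remove trailing // comment; crude but sufficient for brace counting."""
--     pos = line.find("//")
--     return line[:pos] if pos >= 0 else line
--
-- def _find_class_body_end(lines: list[str], start: int) -> int | None:
--     """Declarative version: strip all lines once, compare the position of the
--     first ';'-line with the first '{'-line, then take the first nonpositive
--     entry of the brace-depth prefix sums from the opening line on."""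
--     n = len(lines)
--     scs = [_strip_line_comment(lines[i]) for i in range(start, n)]
--     semi = next((k for k, s in enumerate(scs) if ";" in s), len(scs))
--     opener = next((k for k, s in enumerate(scs) if "{" in s), None)
--     if opener is None or semi < opener:
--         return None  # No brace (forward declaration) or ';' before any '{'.
--     depths = []
--     d = 0
--     for s in scs[opener:]:
--         d += s.count("{") - s.count("}")
--         depths.append(d)
--     end = next((k for k, dk in enumerate(depths) if dk <= 0), None)
--     return None if end is None else start + opener + end
-- ===== Notes on version B (the rewrite author's own statement) =====
-- stated objective: alternative
-- what changed: Replaces A's single flagged scan (which stops at the first '{' or ';') by a declarative formulation: strip all lines once, independently locate the first ';'-line and the first '{'-line and compare their positions, then build the brace-depth prefix-sum table from the opening line and return the index of its first nonpositive entry.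
import Mathlib
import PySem

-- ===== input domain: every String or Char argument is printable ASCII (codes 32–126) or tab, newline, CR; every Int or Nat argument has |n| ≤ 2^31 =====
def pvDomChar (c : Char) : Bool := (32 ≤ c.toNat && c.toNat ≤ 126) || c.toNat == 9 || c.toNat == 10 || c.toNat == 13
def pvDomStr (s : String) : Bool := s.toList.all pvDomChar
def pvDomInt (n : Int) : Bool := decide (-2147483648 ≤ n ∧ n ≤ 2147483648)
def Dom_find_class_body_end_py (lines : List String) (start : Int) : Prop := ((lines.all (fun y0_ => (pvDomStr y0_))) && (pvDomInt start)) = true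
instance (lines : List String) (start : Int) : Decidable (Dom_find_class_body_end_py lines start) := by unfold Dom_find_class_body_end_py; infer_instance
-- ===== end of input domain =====

-- B replaces A's single flagged scan by a declarative formulation: strip all lines once,
-- locate the first ';'-line and the first '{'-line independently and compare their
-- positions, then take the first nonpositive entry of the brace-depth prefix sums from
-- the opening line; equivalence is proved on all inputs where A does not raise.

-- ===== PORT A =====
def pvStrip (line : String) : String :=
  let pos := PySem.Str.find line "//"
  if 0 ≤ pos then PySem.Str.slice line none (some pos) else line

def pvAGo (lines : List String) : List Int → Int → Bool → Option Int
  | [], _, _ => none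
  | idx :: rest, depth, foundOpen =>
    match PySem.List.pyGet? lines idx with
    | none => none   -- IndexError in Python; excluded by Pre_
    | some line =>
      let sc := pvStrip line
      let opens : Int := (PySem.Str.count sc "{" : Int)
      let closes : Int := (PySem.Str.count sc "}" : Int)
      if foundOpen = false then
        if 0 < opens then
          -- found_open becomes true and the `if found_open` block runs on this line
          let depth2 := depth + opens - closes
          if depth2 ≤ 0 then some idx else pvAGo lines rest depth2 true
        else if PySem.Str.isIn ";" sc then none
        else pvAGo lines rest depth false
      else
        let depth2 := depth + opens - closes
        if depth2 ≤ 0 then some idx else pvAGo lines rest depth2 true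

def find_class_body_end_py (lines : List String) (start : Int) : Option Int :=
  pvAGo lines (PySem.List.pyRange start (lines.length : Int)) 0 false

-- ===== PORT B =====
-- the comprehension [ _strip_line_comment(lines[i]) for i in range(start, n) ]
-- (none = IndexError inside the comprehension; excluded by Pre_)
def pvScs? (lines : List String) : List Int → Option (List String)
  | [] => some []
  | i :: t =>
    match PySem.List.pyGet? lines i with
    | none => none
    | some line => (pvScs? lines t).map (pvStrip line :: ·)

-- the depth-accumulating loop building the `depths` prefix-sum table
def pvDepths : List String → Int → List Int
  | [], _ => []
  | s :: t, d =>
    let d2 := d + (PySem.Str.count s "{" : Int) - (PySem.Str.count s "}" : Int)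
    d2 :: pvDepths t d2

def find_class_body_end_py_alt (lines : List String) (start : Int) : Option Int :=
  match pvScs? lines (PySem.List.pyRange start (lines.length : Int)) with
  | none => none
  | some scs =>
    let semi : Nat := (scs.findIdx? (fun s => PySem.Str.isIn ";" s)).getD scs.length
    match scs.findIdx? (fun s => PySem.Str.isIn "{" s) with
    | none => none
    | some opener =>
      if semi < opener then none
      else
        ((pvDepths (scs.drop opener) 0).findIdx? (fun d => decide (d ≤ 0))).map
          (fun e => start + (opener : Int) + (e : Int))

-- ===== PRECONDITION & SPEC =====
-- Pre_ excludes exactly the inputs where Python A raises IndexError (start below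
-- -len(lines), where a negative index under-runs the list); A returns on all others.
def Pre_find_class_body_end_py (lines : List String) (start : Int) : Prop :=
  -(lines.length : Int) ≤ start
instance (lines : List String) (start : Int) : Decidable (Pre_find_class_body_end_py lines start) := by unfold Pre_find_class_body_end_py; infer_instance

def pvWitness_find_class_body_end_py : List String × Int := (["class A {", "};"], 0)

def Spec_find_class_body_end_py (lines : List String) (start : Int) (out : Option Int) : Prop := out = find_class_body_end_py_alt lines start
instance (lines : List String) (start : Int) (out : Option Int) : Decidable (Spec_find_class_body_end_py lines start out) := by unfold Spec_find_class_body_end_py; infer_instance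

-- ===== CLAIM (what is proved, stated in full; the proofs are below) =====
def Claim_equal_find_class_body_end_py : Prop := ∀ (lines : List String) (start : Int), Dom_find_class_body_end_py lines start → Pre_find_class_body_end_py lines start → Spec_find_class_body_end_py lines start (find_class_body_end_py lines start)

-- ===== LEMMAS AND PROOFS =====

-- the stripped line at index i (total form used by the proofs only)
def pvSline (lines : List String) (i : Int) : String :=
  pvStrip ((PySem.List.pyGet? lines i).getD "")

-- pure shape of B's computation once the comprehension is known to succeed
def pvBody (lines : List String) (j : Int) : Option Int :=
  match ((PySem.List.pyRange j (lines.length : Int)).map (pvSline lines)).findIdx?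
      (fun s => PySem.Str.isIn "{" s) with
  | none => none
  | some opener =>
    if (((PySem.List.pyRange j (lines.length : Int)).map (pvSline lines)).findIdx?
          (fun s => PySem.Str.isIn ";" s)).getD
        ((PySem.List.pyRange j (lines.length : Int)).map (pvSline lines)).length < opener then none
    else
      ((pvDepths (((PySem.List.pyRange j (lines.length : Int)).map (pvSline lines)).drop opener) 0).findIdx?
          (fun d => decide (d ≤ 0))).map
        (fun e => j + (opener : Int) + (e : Int))

-- `acc` is a lower bound of Chars.count.go
theorem pvCountGo_le (sub : List Char) : ∀ (fuel : Nat) (s : List Char) (acc : Nat),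
    acc ≤ PySem.Chars.count.go sub fuel s acc := by
  intro fuel
  induction fuel with
  | zero => intro s acc; simp [PySem.Chars.count.go]
  | succ k ih =>
    intro s acc
    cases s with
    | nil => simp [PySem.Chars.count.go]
    | cons h t =>
      rw [PySem.Chars.count.go]
      split
      · exact le_trans (Nat.le_succ acc) (ih _ _)
      · exact ih _ _

theorem pvCountGo_pos_iff (sub : List Char) (hsub : sub ≠ []) :
    ∀ (fuel : Nat) (s : List Char), s.length ≤ fuel →
      (0 < PySem.Chars.count.go sub fuel s 0 ↔ sub <:+: s) := by
  intro fuel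
  induction fuel with
  | zero =>
    intro s hs
    have : s = [] := List.length_eq_zero_iff.mp (Nat.le_zero.mp hs)
    subst this
    simp [PySem.Chars.count.go]
    exact fun h => hsub h
  | succ k ih =>
    intro s hs
    cases s with
    | nil =>
      simp [PySem.Chars.count.go]
      exact fun h => hsub h
    | cons h t =>
      rw [PySem.Chars.count.go]
      split
      · rename_i hpre
        constructor
        · intro _
          exact List.IsPrefix.isInfix (List.isPrefixOf_iff_prefix.mp hpre)
        · intro _
          calc 0 < 0 + 1 := Nat.zero_lt_one
            _ ≤ _ := pvCountGo_le sub k _ (0 + 1)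
      · rename_i hpre
        have ht : t.length ≤ k := by simpa using Nat.succ_le_succ_iff.mp hs
        rw [ih t ht]
        rw [List.infix_cons_iff]
        constructor
        · intro hinf; exact Or.inr hinf
        · intro hor
          cases hor with
          | inl hp => exact absurd (List.isPrefixOf_iff_prefix.mpr hp) hpre
          | inr hi => exact hi

-- `sc.count(sub) > 0` and `sub in sc` are the same test (nonempty needle)
theorem pvCount_pos_iff_isIn (s sub : String) (hsub : sub.toList ≠ []) :
    (0 < (PySem.Str.count s sub : Int)) ↔ PySem.Str.isIn sub s = true := by
  rw [PySem.Str.count_eq, PySem.Str.isIn_iff_infix]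
  rw [PySem.Chars.count]
  simp only [List.isEmpty_iff]
  rw [if_neg hsub]
  have := pvCountGo_pos_iff sub.toList hsub s.toList.length s.toList (le_refl _)
  constructor
  · intro h; exact this.mp (by exact_mod_cast h)
  · intro h; exact_mod_cast this.mpr h

-- the comprehension succeeds when every index is in range
theorem pvScs?_eq_some (lines : List String) : ∀ (L : List Int),
    (∀ i ∈ L, PySem.Raise.InRange lines.length i) →
      pvScs? lines L = some (L.map (pvSline lines)) := by
  intro L
  induction L with
  | nil => intro _; rfl
  | cons i t ih =>
    intro h
    rw [pvScs?]
    cases hget : PySem.List.pyGet? lines i with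
    | none =>
      exact absurd (h i List.mem_cons_self)
        ((PySem.List.pyGet?_eq_none_iff lines i).mp hget)
    | some line =>
      rw [ih (fun x hx => h x (List.mem_cons_of_mem i hx))]
      simp [pvSline, hget]

-- A's loop after found_open is B's prefix-sum table searched for its first ≤ 0 entry
theorem pvBal (lines : List String) :
    ∀ (k : Nat) (j d : Int), ((lines.length : Int) - j).toNat = k → -(lines.length : Int) ≤ j →
      pvAGo lines (PySem.List.pyRange j (lines.length : Int)) d true =
        ((pvDepths ((PySem.List.pyRange j (lines.length : Int)).map (pvSline lines)) d).findIdx?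
            (fun x => decide (x ≤ 0))).map (fun e => j + (e : Int)) := by
  intro k
  induction k with
  | zero =>
    intro j d hj _
    rw [PySem.List.pyRange_one_eq_nil (by omega)]
    rfl
  | succ k ih =>
    intro j d hj hjge
    have hlt : j < (lines.length : Int) := by omega
    rw [PySem.List.pyRange_one_cons hlt]
    rw [pvAGo]
    cases hget : PySem.List.pyGet? lines j with
    | none =>
      exact absurd hget (by
        intro hn
        rw [PySem.List.pyGet?_eq_none_iff] at hn
        exact hn (by unfold PySem.Raise.InRange; omega))
    | some line =>
      simp only
      rw [if_neg (by decide : ¬(true = false))]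
      rw [List.map_cons, pvDepths]
      have hsl : pvSline lines j = pvStrip line := by simp [pvSline, hget]
      rw [hsl]
      simp only [List.findIdx?_cons]
      set d2 := d + (PySem.Str.count (pvStrip line) "{" : Int) - (PySem.Str.count (pvStrip line) "}" : Int) with hd2
      by_cases hle : d2 ≤ 0
      · rw [if_pos hle, if_pos (by simpa using hle)]
        simp
      · rw [if_neg hle, if_neg (by simpa using hle)]
        rw [ih (j + 1) d2 (by omega) (by omega)]
        cases List.findIdx? (fun x => decide (x ≤ 0))
            (pvDepths (List.map (pvSline lines) (PySem.List.pyRange (j + 1) (lines.length : Int))) d2) with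
        | none => rfl
        | some e =>
          simp
          omega

-- main induction: A's flagged loop from j equals B's declarative body at j
theorem pvMain (lines : List String) :
    ∀ (k : Nat) (j : Int), ((lines.length : Int) - j).toNat = k → -(lines.length : Int) ≤ j →
      pvAGo lines (PySem.List.pyRange j (lines.length : Int)) 0 false = pvBody lines j := by
  intro k
  induction k with
  | zero =>
    intro j hj _
    unfold pvBody
    rw [PySem.List.pyRange_one_eq_nil (by omega)]
    rfl
  | succ k ih =>
    intro j hj hjge
    have hlt : j < (lines.length : Int) := by omega
    unfold pvBody
    rw [PySem.List.pyRange_one_cons hlt, List.map_cons]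
    rw [pvAGo]
    cases hget : PySem.List.pyGet? lines j with
    | none =>
      exact absurd hget (by
        intro hn
        rw [PySem.List.pyGet?_eq_none_iff] at hn
        exact hn (by unfold PySem.Raise.InRange; omega))
    | some line =>
      simp only
      rw [if_pos trivial]
      have hsl : pvSline lines j = pvStrip line := by simp [pvSline, hget]
      rw [hsl]
      set sc := pvStrip line with hsc
      simp only [List.findIdx?_cons]
      by_cases hopen : (0 : Int) < (PySem.Str.count sc "{" : Int)
      · -- the opening line: A's loop switches to the balancing mode; use pvBal
        have hinO : PySem.Str.isIn "{" sc = true :=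
          (pvCount_pos_iff_isIn sc "{" (by decide)).mp hopen
        rw [if_pos hopen, hinO, if_pos rfl]
        have hb := pvBal lines (((lines.length : Int) - j).toNat) j 0 rfl hjge
        rw [PySem.List.pyRange_one_cons hlt] at hb
        rw [pvAGo] at hb
        simp only [hget] at hb
        rw [if_neg (by decide : ¬(true = false))] at hb
        rw [List.map_cons, hsl] at hb
        rw [hb]
        simp only [List.drop_zero]
        cases List.findIdx? (fun x => decide (x ≤ 0))
            (pvDepths (sc :: List.map (pvSline lines) (PySem.List.pyRange (j + 1) (lines.length : Int))) 0) with
        | none => rfl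
        | some e => simp
      · have hinO : PySem.Str.isIn "{" sc = false := by
          cases h : PySem.Str.isIn "{" sc
          · rfl
          · exact absurd ((pvCount_pos_iff_isIn sc "{" (by decide)).mpr h) hopen
        rw [if_neg hopen, hinO]
        rw [if_neg (by decide : ¬(false = true))]
        by_cases hsemi : PySem.Str.isIn ";" sc = true
        · -- forward declaration line: A returns none; B's ';'-position is 0
          rw [if_pos hsemi, hsemi, if_pos rfl]
          cases List.findIdx? (fun s => PySem.Str.isIn "{" s)
              (List.map (pvSline lines) (PySem.List.pyRange (j + 1) (lines.length : Int))) with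
          | none => rfl
          | some o =>
            simp only [Option.map_some]
            rw [if_pos (by simp)]
        · -- neutral line: both sides step to j + 1
          rw [if_neg hsemi]
          rw [eq_false_of_ne_true hsemi, if_neg (by decide : ¬(false = true))]
          rw [ih (j + 1) (by omega) (by omega)]
          unfold pvBody
          cases hO : List.findIdx? (fun s => PySem.Str.isIn "{" s)
              (List.map (pvSline lines) (PySem.List.pyRange (j + 1) (lines.length : Int))) with
          | none => rfl
          | some o =>
            simp only [Option.map_some]
            cases hS : List.findIdx? (fun s => PySem.Str.isIn ";" s)
                (List.map (pvSline lines) (PySem.List.pyRange (j + 1) (lines.length : Int))) with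
            | none =>
              simp only [Option.getD_none, Option.map_none, List.length_cons]
              by_cases hc : (List.map (pvSline lines) (PySem.List.pyRange (j + 1) (lines.length : Int))).length < o
              · rw [if_pos hc, if_pos (by omega)]
              · rw [if_neg hc, if_neg (by omega)]
                rw [List.drop_succ_cons]
                cases List.findIdx? (fun x => decide (x ≤ 0))
                    (pvDepths ((List.map (pvSline lines) (PySem.List.pyRange (j + 1) (lines.length : Int))).drop o) 0) with
                | none => rfl
                | some e => simp; omega
            | some m =>
              simp only [Option.map_some, Option.getD_some]
              by_cases hc : m < o
              · rw [if_pos hc, if_pos (by omega)]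
              · rw [if_neg hc, if_neg (by omega)]
                rw [List.drop_succ_cons]
                cases List.findIdx? (fun x => decide (x ≤ 0))
                    (pvDepths ((List.map (pvSline lines) (PySem.List.pyRange (j + 1) (lines.length : Int))).drop o) 0) with
                | none => rfl
                | some e => simp; omega

-- under Pre_, B's port reduces to the pure body
theorem pvAlt_eq_body (lines : List String) (start : Int)
    (hpre : -(lines.length : Int) ≤ start) :
    find_class_body_end_py_alt lines start = pvBody lines start := by
  unfold find_class_body_end_py_alt pvBody
  rw [pvScs?_eq_some lines _ (fun i hi => by
    have := PySem.List.mem_pyRange_one.mp hi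
    unfold PySem.Raise.InRange
    omega)]

-- ===== VERDICT (by name: the statement is the Claim_ definition above) =====
theorem find_class_body_end_py_spec : Claim_equal_find_class_body_end_py := by
  intro lines start _ hpre
  unfold Spec_find_class_body_end_py find_class_body_end_py
  rw [pvAlt_eq_body lines start hpre]
  exact pvMain lines (((lines.length : Int) - start).toNat) start rfl hpre
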